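-- pv_equiv track=rewrite | github.com/tibonihoo/wateronmars | wom_tributary/utils/tweet_summarizers.py | build_reverse_index_cloud
-- ===== SOURCE A (Python) =====
-- NO_TAG = "<NO_TAG>"
--
-- def build_reverse_index_cloud(reverse_index, top_only):
--   freqs = list(sorted(len(t) for t in reverse_index.values()))
--   num_reqs = len(freqs)
--   num_quantiles = 10
--   quantile_length = int(num_reqs/float(num_quantiles))
--   threshold_index = min(num_reqs-1, (num_quantiles-1)*quantile_length)
--   html_entries = []
--   if not freqs:
--     return html_entries
--   max_quantile = freqs[threshold_index]
--   for entry, tweets in reverse_index.items():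
--     if entry == NO_TAG:
--       continue
--     current_freq = len(tweets)
--     if quantile_length != 0 and current_freq > max_quantile:
--       html_entries.append("<strong>{}</strong>".format(entry))
--     elif not top_only:
--       html_entries.append("<small>{}</small>".format(entry))
--   return html_entries
-- ===== SOURCE B (Python) =====
-- NO_TAG = "<NO_TAG>"
--
-- def build_reverse_index_cloud(reverse_index, top_only):
--   if not reverse_index:
--     return []
--   freqs = [len(t) for t in reverse_index.values()]
--   n = len(freqs)
--   q = n // 10
--   k = min(n - 1, 9 * q)
--   # quickselect (middle pivot): k-th smallest frequency, no full sort
--   xs = freqs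
--   while True:
--     p = xs[len(xs) // 2]
--     lows = [x for x in xs if x < p]
--     if k < len(lows):
--       xs = lows
--       continue
--     eq = sum(1 for x in xs if x == p)
--     if k < len(lows) + eq:
--       max_quantile = p
--       break
--     k -= len(lows) + eq
--     xs = [x for x in xs if x > p]
--   out = []
--   for entry, tweets in reverse_index.items():
--     if entry == NO_TAG:
--       continue
--     if q != 0 and len(tweets) > max_quantile:
--       out.append("<strong>{}</strong>".format(entry))
--     elif not top_only:
--       out.append("<small>{}</small>".format(entry))
--   return out
-- ===== Notes on version B (the rewrite author's own statement) =====
-- stated objective: alternative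
-- what changed: Replaces the full sort of the frequency list by a middle-pivot quickselect that extracts only the single order statistic freqs[threshold_index] used as the quantile threshold.
import Mathlib
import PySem

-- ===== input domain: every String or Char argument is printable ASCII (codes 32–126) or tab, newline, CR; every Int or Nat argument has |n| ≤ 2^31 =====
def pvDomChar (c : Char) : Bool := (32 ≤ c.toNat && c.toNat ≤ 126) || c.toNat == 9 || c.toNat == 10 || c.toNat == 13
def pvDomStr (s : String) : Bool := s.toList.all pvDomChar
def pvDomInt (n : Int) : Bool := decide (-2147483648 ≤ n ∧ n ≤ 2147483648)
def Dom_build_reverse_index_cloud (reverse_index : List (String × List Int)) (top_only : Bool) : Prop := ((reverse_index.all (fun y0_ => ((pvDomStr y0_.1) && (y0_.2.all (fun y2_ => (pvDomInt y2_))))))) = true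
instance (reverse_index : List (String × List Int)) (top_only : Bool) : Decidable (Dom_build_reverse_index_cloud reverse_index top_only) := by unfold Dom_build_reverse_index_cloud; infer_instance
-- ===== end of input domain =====

-- B replaces A's full sort of the frequency list by a middle-pivot quickselect of the
-- single order statistic freqs[threshold_index] (objective: alternative algorithm;
-- no speed advantage was measured).

-- ===== PORT A =====
-- literal port of A; `int(num_reqs/float(10))` is `num_reqs // 10` exactly for the
-- nonnegative list sizes that occur; `freqs[threshold_index]` is in range whenever it
-- is evaluated (freqs nonempty), so pyGetD with an arbitrary default is exact.
def build_reverse_index_cloud (reverse_index : List (String × List Int)) (top_only : Bool) : List String :=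
  let d := PySem.Dict.ofList reverse_index
  let freqs := PySem.List.sorted (d.values.map (fun t => (t.length : Int))) (fun x => x) false
  let num_reqs : Int := freqs.length
  let quantile_length : Int := PySem.Int.floordiv num_reqs 10
  let threshold_index : Int := min (num_reqs - 1) (9 * quantile_length)
  if freqs = [] then []
  else
    let max_quantile : Int := PySem.List.pyGetD freqs threshold_index 0
    d.items.foldl
      (fun acc e =>
        if e.1 = "<NO_TAG>" then acc
        else if quantile_length ≠ 0 ∧ max_quantile < (e.2.length : Int) then
          acc ++ ["<strong>" ++ e.1 ++ "</strong>"]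
        else if top_only = false then acc ++ ["<small>" ++ e.1 ++ "</small>"]
        else acc) []

-- ===== PORT B =====
-- helper for qselect's termination: the middle pivot is a member of a nonempty list
theorem pvPivot_mem (xs : List Int) (hx : xs ≠ []) : xs.getD (xs.length / 2) 0 ∈ xs := by
  have hlen : xs.length / 2 < xs.length := by
    have : 0 < xs.length := List.length_pos_iff.mpr hx
    omega
  rw [List.getD_eq_getElem xs 0 hlen]
  exact List.getElem_mem hlen

theorem pvAttach_filter_lt (xs : List Int) (p : Int → Bool) (x : Int) (hx : x ∈ xs)
    (hpx : ¬ p x = true) :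
    (List.filter (fun a : {a // a ∈ xs} => p a.val) xs.attach).unattach.length < xs.length := by
  have h1 : (List.filter (fun a : {a // a ∈ xs} => p a.val) xs.attach).unattach.length
      = (xs.filter p).length := by simp
  rw [h1, List.length_filter_lt_length_iff_exists]
  exact ⟨x, hx, hpx⟩

-- quickselect with middle pivot (the loop of Source B, as recursion on the shrinking list)
def qselect (xs : List Int) (k : Nat) : Int :=
  if hx : xs = [] then 0
  else
    let p := xs.getD (xs.length / 2) 0
    let lows := xs.filter (fun x => decide (x < p))
    if k < lows.length then qselect lows k
    else
      let eq := (xs.filter (fun x => decide (x = p))).length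
      if k < lows.length + eq then p
      else qselect (xs.filter (fun x => decide (p < x))) (k - (lows.length + eq))
termination_by xs.length
decreasing_by
  · exact pvAttach_filter_lt xs (fun y => decide (y < xs.getD (xs.length / 2) 0)) _
      (pvPivot_mem xs hx) (by simp)
  · exact pvAttach_filter_lt xs (fun y => decide (xs.getD (xs.length / 2) 0 < y)) _
      (pvPivot_mem xs hx) (by simp)

def build_reverse_index_cloud_alt (reverse_index : List (String × List Int)) (top_only : Bool) : List String :=
  let d := PySem.Dict.ofList reverse_index
  if d.items = [] then []
  else
    let freqs := d.values.map (fun t => (t.length : Int))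
    let n := freqs.length
    let q := n / 10
    let k := min (n - 1) (9 * q)
    let max_quantile := qselect freqs k
    d.items.foldl
      (fun acc e =>
        if e.1 = "<NO_TAG>" then acc
        else if q ≠ 0 ∧ max_quantile < (e.2.length : Int) then
          acc ++ ["<strong>" ++ e.1 ++ "</strong>"]
        else if top_only = false then acc ++ ["<small>" ++ e.1 ++ "</small>"]
        else acc) []

-- ===== PRECONDITION & SPEC =====
def Spec_build_reverse_index_cloud (reverse_index : List (String × List Int)) (top_only : Bool) (out : List String) : Prop := out = build_reverse_index_cloud_alt reverse_index top_only
instance (reverse_index : List (String × List Int)) (top_only : Bool) (out : List String) : Decidable (Spec_build_reverse_index_cloud reverse_index top_only out) := by unfold Spec_build_reverse_index_cloud; infer_instance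

-- ===== CLAIM (what is proved, stated in full; the proofs are below) =====
def Claim_equal_build_reverse_index_cloud : Prop := ∀ (reverse_index : List (String × List Int)) (top_only : Bool), Dom_build_reverse_index_cloud reverse_index top_only → Spec_build_reverse_index_cloud reverse_index top_only (build_reverse_index_cloud reverse_index top_only)

-- ===== LEMMAS AND PROOFS =====

theorem pvFilter_lt (xs : List Int) (p : Int → Bool) (x : Int) (hx : x ∈ xs) (hpx : ¬ p x = true) :
    (xs.filter p).length < xs.length := by
  rw [List.length_filter_lt_length_iff_exists]; exact ⟨x, hx, hpx⟩


-- quickselect computes the k-th order statistic: qselect xs k = sorted(xs)[k]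
theorem qselect_eq_sorted : ∀ (n : Nat) (xs : List Int), xs.length ≤ n → ∀ k, k < xs.length →
    qselect xs k = (PySem.List.sorted xs (fun x => x) false).getD k 0 := by
  intro n
  induction n with
  | zero => intro xs h k hk; omega
  | succ n ih =>
    intro xs hlen k hk
    have hx : xs ≠ [] := by intro h; subst h; simp at hk
    have hpmem : xs.getD (xs.length / 2) 0 ∈ xs := pvPivot_mem xs hx
    set p := xs.getD (xs.length / 2) 0 with hp
    set lows := xs.filter (fun x => decide (x < p)) with hlows
    set eqs := xs.filter (fun x => decide (x = p)) with heqs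
    set highs := xs.filter (fun x => decide (p < x)) with hhighs
    -- the three-way partition is a permutation of xs
    have perm1 : (lows ++ xs.filter (fun x => !decide (x < p))).Perm xs :=
      List.filter_append_perm _ xs
    have hrest_eq : (xs.filter (fun x => !decide (x < p))).filter (fun x => decide (x = p)) = eqs := by
      rw [List.filter_filter, heqs]
      refine List.filter_congr ?_
      intro x _
      by_cases hxp : x = p
      · subst hxp; simp
      · simp [hxp]
    have hrest_ne : (xs.filter (fun x => !decide (x < p))).filter (fun x => !decide (x = p)) = highs := by
      rw [List.filter_filter, hhighs]
      refine List.filter_congr ?_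
      intro x _
      by_cases hxp : x = p
      · subst hxp; simp
      · by_cases hlt : x < p
        · simp [hxp, hlt, le_of_lt hlt]
        · simp [hxp, hlt, lt_of_le_of_ne (not_lt.mp hlt) (fun e => hxp e.symm)]
    have perm2 : (eqs ++ highs).Perm (xs.filter (fun x => !decide (x < p))) := by
      have := List.filter_append_perm (fun x => decide (x = p)) (xs.filter (fun x => !decide (x < p)))
      rwa [hrest_eq, hrest_ne] at this
    have hperm : (lows ++ (eqs ++ highs)).Perm xs :=
      ((perm2.append_left lows).trans perm1)
    have heqs_rep : eqs = List.replicate eqs.length p := by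
      rw [List.eq_replicate_iff]
      exact ⟨rfl, fun b hb => by simpa using (List.mem_filter.mp hb).2⟩
    have heq_pos : 0 < eqs.length := by
      have : p ∈ eqs := by rw [heqs, List.mem_filter]; exact ⟨hpmem, by simp⟩
      exact List.length_pos_of_mem this
    have hlows_mem : ∀ a ∈ lows, a < p := by
      intro a ha; simpa using (List.mem_filter.mp ha).2
    have hhighs_mem : ∀ a ∈ highs, p < a := by
      intro a ha; simpa using (List.mem_filter.mp ha).2
    -- the sorted list decomposes along the partition
    have hsorted : PySem.List.sorted xs (fun x => x) false
        = PySem.List.sorted lows (fun x => x) false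
          ++ (List.replicate eqs.length p ++ PySem.List.sorted highs (fun x => x) false) := by
      apply PySem.List.sorted_id_eq_of_perm_of_pairwise
      · refine List.Perm.trans ?_ hperm
        refine List.Perm.append (PySem.List.sorted_perm _ _ _) ?_
        exact List.Perm.append (heqs_rep ▸ List.Perm.refl _) (PySem.List.sorted_perm _ _ _)
      · rw [List.pairwise_append]
        refine ⟨PySem.List.sorted_pairwise lows (fun x => x), ?_, ?_⟩
        · rw [List.pairwise_append]
          refine ⟨List.pairwise_replicate.mpr (Or.inr le_rfl),
            PySem.List.sorted_pairwise highs (fun x => x), ?_⟩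
          intro a ha b hb
          have hap : a = p := List.eq_of_mem_replicate ha
          have hbp : p < b := hhighs_mem b ((PySem.List.mem_sorted _ _ _ _).mp hb)
          subst hap; exact le_of_lt hbp
        · intro a ha b hb
          have hap : a < p := hlows_mem a ((PySem.List.mem_sorted _ _ _ _).mp ha)
          rcases List.mem_append.mp hb with hb | hb
          · have : b = p := List.eq_of_mem_replicate hb
            subst this; exact le_of_lt hap
          · exact le_of_lt (lt_trans hap (hhighs_mem b ((PySem.List.mem_sorted _ _ _ _).mp hb)))
    have hlen_split : xs.length = lows.length + (eqs.length + highs.length) := by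
      have h1 := hperm.length_eq
      simp only [List.length_append] at h1
      omega
    have hlows_lt : lows.length < xs.length := by
      rw [hlows]
      exact pvFilter_lt xs _ p hpmem (by simp)
    have hhighs_lt : highs.length < xs.length := by
      rw [hhighs]
      exact pvFilter_lt xs _ p hpmem (by simp)
    -- unfold one step of qselect and chase the three branches
    rw [qselect]
    rw [dif_neg hx]
    rw [hsorted]
    by_cases h1 : k < lows.length
    · rw [if_pos (by rwa [← hlows])]
      rw [List.getD_append _ _ _ _ (by rwa [PySem.List.length_sorted])]
      exact ih lows (by omega) k h1
    · rw [if_neg (by rwa [← hlows])]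
      rw [List.getD_append_right _ _ _ _ (by rw [PySem.List.length_sorted]; omega)]
      rw [PySem.List.length_sorted]
      by_cases h2 : k < lows.length + eqs.length
      · rw [if_pos (by rw [← hlows, ← heqs]; exact h2)]
        rw [List.getD_append _ _ _ _ (by simpa using by omega)]
        exact (List.getD_replicate p (by omega)).symm
      · rw [if_neg (by rw [← hlows, ← heqs]; exact h2)]
        rw [List.getD_append_right _ _ _ _ (by simp; omega)]
        rw [List.length_replicate]
        have hk' : k - lows.length - eqs.length < highs.length := by omega
        have := ih highs (by omega) (k - lows.length - eqs.length) hk'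
        rw [← hlows, ← heqs]
        convert this using 2
        omega

-- ===== VERDICT (by name: the statement is the Claim_ definition above) =====
theorem build_reverse_index_cloud_spec : Claim_equal_build_reverse_index_cloud := by
  intro ri top _
  unfold Spec_build_reverse_index_cloud
  simp only [build_reverse_index_cloud, build_reverse_index_cloud_alt]
  set d := PySem.Dict.ofList ri with hd
  set vals := d.values.map (fun t => (t.length : Int)) with hvals
  by_cases hempty : d.items = []
  · have hv : vals = [] := by
      rw [hvals]
      simp [PySem.Dict.values, hempty]
    rw [if_pos (by rw [hv]; simp [PySem.List.sorted_eq_nil_iff]), if_pos hempty]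
  · have hv : vals ≠ [] := by
      rw [hvals]
      simp [PySem.Dict.values, hempty]
    have hn : 0 < vals.length := List.length_pos_iff.mpr hv
    have hsne : PySem.List.sorted vals (fun x => x) false ≠ [] := by
      rw [Ne, PySem.List.sorted_eq_nil_iff]; exact hv
    rw [if_neg hsne, if_neg hempty]
    have hLs : (PySem.List.sorted vals (fun x => x) false).length = vals.length :=
      PySem.List.length_sorted _ _ _
    have hq : PySem.Int.floordiv ((PySem.List.sorted vals (fun x => x) false).length : Int) 10
        = ((vals.length / 10 : Nat) : Int) := by
      rw [hLs]
      exact_mod_cast PySem.Int.floordiv_natCast vals.length 10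
    rw [hq]
    set k : Nat := min (vals.length - 1) (9 * (vals.length / 10)) with hk
    have hthr : min (((PySem.List.sorted vals (fun x => x) false).length : Int) - 1)
        (9 * ((vals.length / 10 : Nat) : Int)) = (k : Int) := by
      rw [hLs, hk]
      push_cast [Nat.cast_sub (by omega : 1 ≤ vals.length)]
      omega
    rw [hthr]
    have hklt : k < vals.length := by omega
    have hmax : PySem.List.pyGetD (PySem.List.sorted vals (fun x => x) false) (k : Int) 0
        = qselect vals k := by
      rw [PySem.List.pyGetD_natCast]
      exact (qselect_eq_sorted vals.length vals le_rfl k hklt).symm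
    rw [hmax]
    congr 1
    funext acc e
    by_cases h0 : e.1 = "<NO_TAG>"
    · simp [h0]
    · by_cases hql : vals.length / 10 = 0
      · simp [h0, hql]
      · have h1 : ¬((vals.length : Int) / 10 = 0) := by
          have : ((vals.length / 10 : Nat) : Int) = (vals.length : Int) / 10 := by push_cast; ring_nf
          rw [← this]; exact_mod_cast hql
        simp [h0, hql, h1]
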